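-- pv_equiv track=rewrite | github.com/namakib/parallel-processing | Assignment2/Assignment2.py | partition_rows
-- ===== SOURCE A (Python) =====
-- from typing import List, Tuple, Dict
--
-- def partition_rows(N: int, W: int) -> List[Tuple[int, int]]:
--     start = 1
--     end = N - 1
--     total = end - start  # N-2 interior rows
--     base = total // W
--     rem = total % W
--     parts = []
--     cur = start
--     for i in range(W):
--         add = base + (1 if i < rem else 0)
--         parts.append((cur, cur + add))  # [r0, r1)
--         cur += add
--     return parts
-- ===== SOURCE B (Python) =====
-- def partition_rows(N, W):
--     start = 1
--     total = (N - 1) - start  # N-2 interior rows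
--     base = total // W
--     rem = total % W
--     bounds = [start + i * base + min(i, rem) for i in range(W + 1)]
--     return list(zip(bounds, bounds[1:]))
-- ===== Notes on version B (the rewrite author's own statement) =====
-- stated objective: alternative
-- what changed: Replaces the running-cursor accumulator loop with a closed-form boundary table bounds[i] = start + i*base + min(i, rem) and pairs adjacent boundaries with zip.
import Mathlib
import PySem

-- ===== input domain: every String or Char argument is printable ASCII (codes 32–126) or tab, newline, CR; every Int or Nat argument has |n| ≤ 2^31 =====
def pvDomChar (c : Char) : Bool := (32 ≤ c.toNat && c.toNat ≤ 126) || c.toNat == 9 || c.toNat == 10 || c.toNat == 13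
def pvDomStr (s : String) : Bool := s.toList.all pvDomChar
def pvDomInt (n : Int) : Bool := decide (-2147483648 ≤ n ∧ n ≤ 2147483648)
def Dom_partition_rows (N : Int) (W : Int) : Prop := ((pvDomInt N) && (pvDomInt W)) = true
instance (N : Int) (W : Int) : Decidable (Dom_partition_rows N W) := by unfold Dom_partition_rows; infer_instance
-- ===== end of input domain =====

-- B replaces A's running-cursor accumulator loop with a closed-form boundary table paired by zip; same O(W) cost ("alternative").


-- ===== PORT A =====
def partition_rows (N : Int) (W : Int) : List (Int × Int) :=
  let start : Int := 1
  let endv : Int := N - 1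
  let total : Int := endv - start
  let base : Int := PySem.Int.floordiv total W
  let rem : Int := PySem.Int.mod total W
  let st := (PySem.List.pyRange 0 W 1).foldl
    (fun (st : List (Int × Int) × Int) i =>
      let add := base + (if i < rem then (1 : Int) else 0)
      (st.1 ++ [(st.2, st.2 + add)], st.2 + add)) ([], start)
  st.1

-- ===== PORT B =====
def partition_rows_alt (N : Int) (W : Int) : List (Int × Int) :=
  let start : Int := 1
  let total : Int := (N - 1) - start
  let base : Int := PySem.Int.floordiv total W
  let rem : Int := PySem.Int.mod total W
  let bounds := (PySem.List.pyRange 0 (W + 1) 1).map (fun i => start + i * base + min i rem)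
  bounds.zip (bounds.drop 1)

-- ===== PRECONDITION & SPEC =====
-- Python A raises ZeroDivisionError at 'total // W' exactly when W = 0 (B raises there too).
def Pre_partition_rows (N : Int) (W : Int) : Prop := W ≠ 0
instance (N : Int) (W : Int) : Decidable (Pre_partition_rows N W) := by unfold Pre_partition_rows; infer_instance
def pvWitness_partition_rows : Int × Int := (10, 3)

def Spec_partition_rows (N : Int) (W : Int) (out : List (Int × Int)) : Prop := out = partition_rows_alt N W
instance (N : Int) (W : Int) (out : List (Int × Int)) : Decidable (Spec_partition_rows N W out) := by unfold Spec_partition_rows; infer_instance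

-- ===== CLAIM (what is proved, stated in full; the proofs are below) =====
def Claim_equal_partition_rows : Prop := ∀ (N : Int) (W : Int), Dom_partition_rows N W → Pre_partition_rows N W → Spec_partition_rows N W (partition_rows N W)

-- ===== LEMMAS AND PROOFS =====

-- The closed-form boundary of partition i: where A's cursor sits after i loop iterations.
def pvBound (base rem i : Int) : Int := 1 + i * base + min i rem

-- Cursor invariant for A's loop: after folding range n, parts is the list of consecutive
-- boundary pairs and the cursor sits at pvBound base rem n (needs 0 ≤ rem for the base case
-- and for the per-step increment min(i+1,rem) - min(i,rem) = [i < rem]).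
lemma loopA (base rem : Int) (hrem : 0 ≤ rem) (n : Nat) :
    List.foldl
      (fun (st : List (Int × Int) × Int) (i : Int) =>
        (st.1 ++ [(st.2, st.2 + (base + (if i < rem then (1 : Int) else 0)))],
         st.2 + (base + (if i < rem then (1 : Int) else 0))))
      ([], 1) ((List.range n).map (Nat.cast : Nat → Int))
    = ((List.range n).map (fun k : Nat => (pvBound base rem (k : Int), pvBound base rem ((k : Int) + 1))), pvBound base rem n) := by
  induction n with
  | zero => simp [pvBound, min_eq_left hrem]
  | succ n ih =>
      have hstep : pvBound base rem (n : Int) + (base + (if (n : Int) < rem then (1 : Int) else 0))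
          = pvBound base rem ((n : Int) + 1) := by
        simp only [pvBound]
        have hb : ((n : Int) + 1) * base = (n : Int) * base + base := by ring
        rw [hb]; split_ifs with h <;> omega
      rw [List.range_succ, List.map_append, List.foldl_append, ih]
      simp only [List.map_cons, List.map_nil, List.foldl_cons, List.foldl_nil, List.map_append]
      push_cast
      rw [hstep]

-- zip-with-tail over a mapped arithmetic range pairs consecutive values (generalized start).
lemma zipTail' {α : Type} (g : Nat → α) : ∀ (n s : Nat),
    (List.map g (s :: List.range' (s + 1) n)).zip (List.map g (List.range' (s + 1) n))
    = List.map (fun k => (g k, g (k + 1))) (List.range' s n)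
  | 0, s => by simp
  | n + 1, s => by
      rw [List.range'_succ (s := s + 1) (n := n), List.range'_succ (s := s) (n := n)]
      simp only [List.map_cons, List.zip_cons_cons]
      have h := zipTail' g n (s + 1)
      simp only [List.map_cons] at h
      rw [h]

lemma zipTail {α : Type} (g : Nat → α) (n : Nat) :
    (((List.range (n + 1)).map g).zip (((List.range (n + 1)).map g).drop 1))
    = (List.range n).map (fun k => (g k, g (k + 1))) := by
  rw [List.range_eq_range', List.range_eq_range', List.range'_succ (s := 0) (n := n)]
  simp only [List.map_cons, List.drop_succ_cons, List.drop_zero, Nat.zero_add]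
  exact zipTail' g n 0

lemma main_eq (N W : Int) (hW : W ≠ 0) : partition_rows N W = partition_rows_alt N W := by
  unfold partition_rows partition_rows_alt
  simp only []
  rcases lt_or_gt_of_ne hW with hneg | hpos
  · -- W < 0: both ranges are empty, both programs return []
    rw [PySem.List.pyRange_one, PySem.List.pyRange_one]
    have h1 : (W - 0).toNat = 0 := by omega
    have h2 : (W + 1 - 0).toNat = 0 := by omega
    rw [h1, h2]
    simp
  · -- W > 0
    have hrem0 : 0 ≤ PySem.Int.mod (N - 1 - 1) W := PySem.Int.mod_nonneg _ hpos
    obtain ⟨n, hn⟩ : ∃ n : Nat, W = (n : Int) := ⟨W.toNat, by omega⟩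
    rw [PySem.List.pyRange_one, PySem.List.pyRange_one]
    have h1 : (W - 0).toNat = n := by omega
    have h2 : (W + 1 - 0).toNat = n + 1 := by omega
    rw [h1, h2]
    simp only [zero_add]
    have hA := loopA (PySem.Int.floordiv (N - 1 - 1) W) (PySem.Int.mod (N - 1 - 1) W) hrem0 n
    have hB := zipTail (fun k : Nat => (1 : Int) + (k : Int) * PySem.Int.floordiv (N - 1 - 1) W
      + min (k : Int) (PySem.Int.mod (N - 1 - 1) W)) n
    rw [show (List.map (fun k : Nat => ((k : Int))) (List.range n)) = List.map (Nat.cast : Nat → Int) (List.range n) from rfl, hA]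
    simp only [pvBound, List.map_map, Function.comp_def]
    push_cast at hB ⊢
    exact hB.symm

-- ===== VERDICT (by name: the statement is the Claim_ definition above) =====
theorem partition_rows_spec : Claim_equal_partition_rows := by
  intro N W _ hW
  unfold Spec_partition_rows
  exact main_eq N W hW
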